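-- pv_equiv track=rewrite | github.com/caize0401/CDCC | 01-Data-Analysis-And-Feature-Extraction/task1/feature_selection_analysis.py | classify_features
-- ===== SOURCE A (Python) =====
-- def classify_features(feature_cols):
--     """对特征进行分类"""
--     time_domain_features = [
--         'mean', 'maximum', 'minimum', 'variance', 'std', 'skewness', 'kurtosis',
--         'median', 'q25', 'q75', 'linear_slope', 'linear_intercept', 'linear_rss',
--         'c3_0', 'c3_1', 'c3_2', 'c3_3', 'c4_0', 'c4_1', 'c4_2', 'c4_3', 'c4_4',
--         'absolute_sum_of_changes', 'mean_abs_change', 'number_peaks', 'index_mass_quantile'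
--     ]
--
--     freq_domain_features = [
--         'spectral_centroid', 'spectral_bandwidth', 'spectral_rolloff', 'spectral_entropy'
--     ]
--
--     time_freq_features = [
--         'wavelet_energy_A4', 'wavelet_energy_D4', 'wavelet_energy_D3', 'wavelet_energy_D2', 'wavelet_energy_D1'
--     ]
--
--     feature_classification = {}
--     for feat in feature_cols:
--         if feat in time_domain_features:
--             feature_classification[feat] = '时域特征'
--         elif feat in freq_domain_features:
--             feature_classification[feat] = '频域特征'
--         elif feat in time_freq_features:
--             feature_classification[feat] = '时频域特征'
--         else:
--             feature_classification[feat] = '其他特征'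
--
--     return feature_classification
-- ===== SOURCE B (Python) =====
-- def classify_features(feature_cols):
--     """对特征进行分类"""
--     time_domain_features = [
--         'mean', 'maximum', 'minimum', 'variance', 'std', 'skewness', 'kurtosis',
--         'median', 'q25', 'q75', 'linear_slope', 'linear_intercept', 'linear_rss',
--         'c3_0', 'c3_1', 'c3_2', 'c3_3', 'c4_0', 'c4_1', 'c4_2', 'c4_3', 'c4_4',
--         'absolute_sum_of_changes', 'mean_abs_change', 'number_peaks', 'index_mass_quantile'
--     ]
--
--     freq_domain_features = [
--         'spectral_centroid', 'spectral_bandwidth', 'spectral_rolloff', 'spectral_entropy'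
--     ]
--
--     time_freq_features = [
--         'wavelet_energy_A4', 'wavelet_energy_D4', 'wavelet_energy_D3', 'wavelet_energy_D2', 'wavelet_energy_D1'
--     ]
--
--     # Inverted loops: default every requested feature to 其他特征 first, then
--     # sweep the fixed category tables and stamp their present members in place
--     # (overwriting keeps dict order).  Passes run in increasing priority, so a
--     # later pass wins, matching the if/elif chain's precedence.
--     feature_classification = {feat: '其他特征' for feat in feature_cols}
--     for category, names in [('时频域特征', time_freq_features),
--                             ('频域特征', freq_domain_features),
--                             ('时域特征', time_domain_features)]:
--         for name in names:
--             if name in feature_classification: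
--                 feature_classification[name] = category
--
--     return feature_classification
-- ===== Notes on version B (the rewrite author's own statement) =====
-- stated objective: faster
-- what changed: Inverts the loop structure: instead of classifying each feature through a four-way list-membership chain, B defaults every feature to 其他特征 in one dict pass, then sweeps the three fixed category lists stamping each name present in the result dict, with passes ordered so the last one has the chain's priority.
import Mathlib
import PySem

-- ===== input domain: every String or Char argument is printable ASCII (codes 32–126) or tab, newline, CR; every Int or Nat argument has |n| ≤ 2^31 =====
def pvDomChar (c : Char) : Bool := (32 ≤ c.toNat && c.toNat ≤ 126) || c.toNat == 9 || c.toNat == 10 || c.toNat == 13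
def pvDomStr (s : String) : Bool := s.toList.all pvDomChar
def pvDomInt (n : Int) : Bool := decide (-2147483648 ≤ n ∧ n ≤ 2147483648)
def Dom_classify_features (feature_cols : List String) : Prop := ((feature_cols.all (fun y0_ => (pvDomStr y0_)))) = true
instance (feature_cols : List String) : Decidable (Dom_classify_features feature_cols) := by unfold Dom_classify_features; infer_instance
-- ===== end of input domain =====

-- B inverts the loops: default every feature to 其他特征, then sweep the fixed
-- category tables stamping present members in place (later pass wins = chain
-- priority); return value only (measured faster in a timing run).

-- ===== PORT A =====
-- the three fixed category lists A declares (B's source declares the same literals)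
def pvTimeList : List String :=
  ["mean", "maximum", "minimum", "variance", "std", "skewness", "kurtosis",
   "median", "q25", "q75", "linear_slope", "linear_intercept", "linear_rss",
   "c3_0", "c3_1", "c3_2", "c3_3", "c4_0", "c4_1", "c4_2", "c4_3", "c4_4",
   "absolute_sum_of_changes", "mean_abs_change", "number_peaks", "index_mass_quantile"]

def pvFreqList : List String :=
  ["spectral_centroid", "spectral_bandwidth", "spectral_rolloff", "spectral_entropy"]

def pvTFList : List String :=
  ["wavelet_energy_A4", "wavelet_energy_D4", "wavelet_energy_D3", "wavelet_energy_D2", "wavelet_energy_D1"]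

def classify_features (feature_cols : List String) : List (String × String) :=
  (feature_cols.foldl (fun d feat =>
      if pvTimeList.contains feat then d.insert feat "时域特征"
      else if pvFreqList.contains feat then d.insert feat "频域特征"
      else if pvTFList.contains feat then d.insert feat "时频域特征"
      else d.insert feat "其他特征")
    PySem.Dict.empty).items

-- ===== PORT B =====
def classify_features_alt (feature_cols : List String) : List (String × String) :=
  -- {feat: '其他特征' for feat in feature_cols}
  let d0 := feature_cols.foldl (fun d feat => d.insert feat "其他特征") PySem.Dict.empty
  -- for category, names in [...]: for name in names: if name in d: d[name] = category
  (([("时频域特征", pvTFList), ("频域特征", pvFreqList), ("时域特征", pvTimeList)]).foldl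
      (fun d p => p.2.foldl (fun d name => if d.contains name then d.insert name p.1 else d) d)
      d0).items

-- ===== PRECONDITION & SPEC =====
def Spec_classify_features (feature_cols : List String) (out : List (String × String)) : Prop := out = classify_features_alt feature_cols
instance (feature_cols : List String) (out : List (String × String)) : Decidable (Spec_classify_features feature_cols out) := by unfold Spec_classify_features; infer_instance

-- ===== CLAIM (what is proved, stated in full; the proofs are below) =====
def Claim_equal_classify_features : Prop := ∀ (feature_cols : List String), Dom_classify_features feature_cols → Spec_classify_features feature_cols (classify_features feature_cols)

-- ===== LEMMAS AND PROOFS =====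

-- the value A's four-way chain assigns to a key
def pvChain (feat : String) : String :=
  if pvTimeList.contains feat then "时域特征"
  else if pvFreqList.contains feat then "频域特征"
  else if pvTFList.contains feat then "时频域特征"
  else "其他特征"

-- A's loop body always inserts at feat; the value is pvChain feat
theorem pv_stepA (d : PySem.Dict String String) (feat : String) :
    (if pvTimeList.contains feat then d.insert feat "时域特征"
     else if pvFreqList.contains feat then d.insert feat "频域特征"
     else if pvTFList.contains feat then d.insert feat "时频域特征"
     else d.insert feat "其他特征")
      = d.insert feat (pvChain feat) := by
  unfold pvChain; split_ifs <;> rfl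

theorem pv_foldA_eq (l : List String) (d : PySem.Dict String String) :
    l.foldl (fun d feat =>
        if pvTimeList.contains feat then d.insert feat "时域特征"
        else if pvFreqList.contains feat then d.insert feat "频域特征"
        else if pvTFList.contains feat then d.insert feat "时频域特征"
        else d.insert feat "其他特征") d
      = l.foldl (fun d feat => d.insert feat (pvChain feat)) d := by
  induction l generalizing d with
  | nil => rfl
  | cons x xs ih => simp only [List.foldl_cons, pv_stepA]

-- lookup after a fold of key-determined inserts
theorem pv_getD_foldl_insert (l : List String) (f : String → String)
    (d : PySem.Dict String String) (k dflt : String) :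
    (l.foldl (fun d x => d.insert x (f x)) d).getD k dflt
      = if l.contains k then f k else d.getD k dflt := by
  induction l generalizing d with
  | nil => simp
  | cons x xs ih =>
    simp only [List.foldl_cons, ih, PySem.Dict.getD_insert, List.contains_cons]
    by_cases hk : k = x
    · by_cases hxs : xs.contains k <;> simp [hk]
    · have : (x == k) = false := by simp [Ne.symm hk]
      simp [this, hk]

-- membership after a fold of inserts
theorem pv_contains_foldl_insert (l : List String) (f : String → String)
    (d : PySem.Dict String String) (k : String) :
    (l.foldl (fun d x => d.insert x (f x)) d).contains k
      = (l.contains k || d.contains k) := by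
  induction l generalizing d with
  | nil => simp
  | cons x xs ih =>
    rw [List.foldl_cons, ih, PySem.Dict.contains_insert]
    by_cases hk : k = x
    · simp [hk]
    · have hb : (k == x) = false := by simp [hk]
      simp [hk, hb]

-- a stamping pass never changes the key list
theorem pv_keys_stage (l : List String) (c : String) (d : PySem.Dict String String) :
    (l.foldl (fun d n => if d.contains n then d.insert n c else d) d).keys = d.keys := by
  induction l generalizing d with
  | nil => rfl
  | cons n ns ih =>
    simp only [List.foldl_cons]
    by_cases h : d.contains n
    · simp [h, ih, PySem.Dict.keys_insert_of_contains d _ h]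
    · simp [h, ih]

-- nor membership
theorem pv_contains_stage (l : List String) (c : String) (d : PySem.Dict String String)
    (k : String) :
    (l.foldl (fun d n => if d.contains n then d.insert n c else d) d).contains k
      = d.contains k := by
  rw [PySem.Dict.contains_eq_decide_mem_keys, pv_keys_stage,
      ← PySem.Dict.contains_eq_decide_mem_keys]

-- lookup after a stamping pass
theorem pv_getD_stage (l : List String) (c : String) (d : PySem.Dict String String)
    (k dflt : String) :
    (l.foldl (fun d n => if d.contains n then d.insert n c else d) d).getD k dflt
      = if l.contains k && d.contains k then c else d.getD k dflt := by
  induction l generalizing d with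
  | nil => simp
  | cons n ns ih =>
    simp only [List.foldl_cons]
    by_cases h : d.contains n
    · simp only [h, if_true, ih, PySem.Dict.contains_insert, PySem.Dict.getD_insert,
        List.contains_cons]
      by_cases hk : k = n
      · simp [hk, h]
      · have hb : (n == k) = false := by simp [Ne.symm hk]
        simp_all
    · simp only [h, ih, List.contains_cons]
      by_cases hk : k = n
      · simp [hk, h]
      · simp [hk]

-- the final dicts agree on every lookup
theorem pv_getD_final (feature_cols : List String) (k : String) :
    (([("时频域特征", pvTFList), ("频域特征", pvFreqList), ("时域特征", pvTimeList)]).foldl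
        (fun d p => p.2.foldl (fun d name => if d.contains name then d.insert name p.1 else d) d)
        (feature_cols.foldl (fun d feat => d.insert feat "其他特征") PySem.Dict.empty)).getD k "其他特征"
      = (feature_cols.foldl (fun d feat => d.insert feat (pvChain feat)) PySem.Dict.empty).getD k "其他特征" := by
  simp only [List.foldl_cons, List.foldl_nil]
  rw [pv_getD_stage, pv_getD_stage, pv_getD_stage,
      pv_contains_stage, pv_contains_stage,
      pv_getD_foldl_insert, pv_getD_foldl_insert, pv_contains_foldl_insert]
  simp only [PySem.Dict.contains_empty, PySem.Dict.getD_empty, Bool.or_false]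
  unfold pvChain
  by_cases hfc : k ∈ feature_cols <;>
    by_cases h1 : k ∈ pvTimeList <;>
    by_cases h2 : k ∈ pvFreqList <;>
    by_cases h3 : k ∈ pvTFList <;>
      simp [hfc, h1, h2, h3]

-- both key lists are the distinct features, in first-occurrence order
theorem pv_keys_final (feature_cols : List String) :
    (([("时频域特征", pvTFList), ("频域特征", pvFreqList), ("时域特征", pvTimeList)]).foldl
        (fun d p => p.2.foldl (fun d name => if d.contains name then d.insert name p.1 else d) d)
        (feature_cols.foldl (fun d feat => d.insert feat "其他特征") PySem.Dict.empty)).keys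
      = (feature_cols.foldl (fun d feat => d.insert feat (pvChain feat)) PySem.Dict.empty).keys := by
  simp only [List.foldl_cons, List.foldl_nil]
  rw [pv_keys_stage, pv_keys_stage, pv_keys_stage,
      PySem.Dict.keys_foldl_insert, PySem.Dict.keys_foldl_insert]

-- ===== VERDICT (by name: the statement is the Claim_ definition above) =====
theorem classify_features_spec : Claim_equal_classify_features := by
  intro feature_cols _
  unfold Spec_classify_features classify_features classify_features_alt
  rw [pv_foldA_eq]
  have hndA : (feature_cols.foldl (fun d feat => d.insert feat (pvChain feat))
      PySem.Dict.empty).keys.Nodup :=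
    PySem.Dict.nodup_keys_foldl_insert _ _ _ (by simp)
  have hndB : (([("时频域特征", pvTFList), ("频域特征", pvFreqList), ("时域特征", pvTimeList)]).foldl
      (fun d p => p.2.foldl (fun d name => if d.contains name then d.insert name p.1 else d) d)
      (feature_cols.foldl (fun d feat => d.insert feat "其他特征") PySem.Dict.empty)).keys.Nodup := by
    rw [pv_keys_final]; exact hndA
  rw [PySem.Dict.items_eq_map_keys _ hndA "其他特征",
      PySem.Dict.items_eq_map_keys _ hndB "其他特征",
      pv_keys_final]
  exact (List.map_congr_left (fun k _ => by rw [pv_getD_final])).symm
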